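-- pv_equiv track=rewrite | github.com/YuhengHuang42/trust_codeLLM | method/collect_hidden_aug.py | adjust_indices
-- ===== SOURCE A (Python) =====
-- def adjust_indices(sub_indicator_list, removal_indices):
--     # Create a set for fast lookup of removal indices
--     removal_indices_set = set(removal_indices)
--
--     # Adjust sub_indicator_list by accounting for removed indices
--     adjusted_sub_indicator_list = []
--     for index in sub_indicator_list:
--         # If the index was removed, skip it
--         if index in removal_indices_set:
--             continue
--
--         # Count how many previous elements have been removed before the current index
--         shift = sum(1 for ri in removal_indices if ri < index)
--
--         # Adjust the index by subtracting the number of removed elements before it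
--         adjusted_sub_indicator_list.append(index - shift)
--
--     return adjusted_sub_indicator_list
-- ===== SOURCE B (Python) =====
-- def adjust_indices(sub_indicator_list, removal_indices):
--     # Sort removals once; per surviving index, count prior removals by binary search.
--     removed = set(removal_indices)
--     srt = sorted(removal_indices)
--     n = len(srt)
--     out = []
--     for index in sub_indicator_list:
--         if index in removed:
--             continue
--         lo, hi = 0, n
--         while lo < hi:
--             mid = (lo + hi) // 2
--             if srt[mid] < index:
--                 lo = mid + 1
--             else:
--                 hi = mid
--         out.append(index - lo)
--     return out
-- ===== Notes on version B (the rewrite author's own statement) =====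
-- stated objective: faster
-- what changed: Instead of a linear scan over removal_indices for every kept element, B sorts removal_indices once and finds the count of smaller removals by a hand-written bisect_left binary search.
import Mathlib
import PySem

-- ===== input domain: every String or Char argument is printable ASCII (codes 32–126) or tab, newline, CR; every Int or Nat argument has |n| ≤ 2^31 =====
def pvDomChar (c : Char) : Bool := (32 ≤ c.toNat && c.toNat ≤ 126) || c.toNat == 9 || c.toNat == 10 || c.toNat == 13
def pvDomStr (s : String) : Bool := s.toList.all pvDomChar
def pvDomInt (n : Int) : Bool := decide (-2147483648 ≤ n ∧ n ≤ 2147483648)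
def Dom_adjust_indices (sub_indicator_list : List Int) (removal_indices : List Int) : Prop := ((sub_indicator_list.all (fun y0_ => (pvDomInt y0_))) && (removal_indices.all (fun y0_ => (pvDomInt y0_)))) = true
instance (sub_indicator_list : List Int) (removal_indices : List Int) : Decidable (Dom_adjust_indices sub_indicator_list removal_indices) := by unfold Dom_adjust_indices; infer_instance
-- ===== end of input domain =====

-- ===== PORT A =====
-- B sorts removal_indices once and counts prior removals by binary search (faster); A rescans removal_indices per element.
def adjust_indices (sub_indicator_list : List Int) (removal_indices : List Int) : List Int :=
  let removal_indices_set := PySem.Set.ofList removal_indices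
  sub_indicator_list.foldl (fun acc index =>
    if PySem.Set.contains removal_indices_set index then acc
    else
      let shift : Int := removal_indices.foldl (fun c ri => if ri < index then c + 1 else c) 0
      acc ++ [index - shift]) []

-- ===== PORT B =====
-- the hand-written bisect_left while-loop of Source B
def pvBisectGo (srt : List Int) (x : Int) (lo hi : Nat) : Nat :=
  if _h : lo < hi then
    if srt.getD ((lo + hi) / 2) 0 < x then pvBisectGo srt x ((lo + hi) / 2 + 1) hi
    else pvBisectGo srt x lo ((lo + hi) / 2)
  else lo
termination_by hi - lo
decreasing_by all_goals omega

def adjust_indices_alt (sub_indicator_list : List Int) (removal_indices : List Int) : List Int :=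
  let removed := PySem.Set.ofList removal_indices
  let srt := PySem.List.sorted removal_indices (fun x => x) false
  let n := srt.length
  sub_indicator_list.foldl (fun out index =>
    if PySem.Set.contains removed index then out
    else out ++ [index - (pvBisectGo srt index 0 n : Int)]) []

-- ===== PRECONDITION & SPEC =====
def Spec_adjust_indices (sub_indicator_list : List Int) (removal_indices : List Int) (out : List Int) : Prop := out = adjust_indices_alt sub_indicator_list removal_indices
instance (sub_indicator_list : List Int) (removal_indices : List Int) (out : List Int) : Decidable (Spec_adjust_indices sub_indicator_list removal_indices out) := by unfold Spec_adjust_indices; infer_instance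

-- ===== CLAIM (what is proved, stated in full; the proofs are below) =====
def Claim_equal_adjust_indices : Prop := ∀ (sub_indicator_list : List Int) (removal_indices : List Int), Dom_adjust_indices sub_indicator_list removal_indices → Spec_adjust_indices sub_indicator_list removal_indices (adjust_indices sub_indicator_list removal_indices)

-- ===== LEMMAS AND PROOFS =====

-- a list split at r with the predicate true before and false after has countP = r
lemma countP_cut (l : List Int) (p : Int → Bool) (r : Nat) (hr : r ≤ l.length)
    (h1 : ∀ i (h : i < r), p (l[i]'(lt_of_lt_of_le h hr)) = true)
    (h2 : ∀ i (h : i < l.length), r ≤ i → p l[i] = false) :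
    l.countP p = r := by
  have hsplit := List.take_append_drop r l
  calc l.countP p = (l.take r ++ l.drop r).countP p := by rw [hsplit]
    _ = (l.take r).countP p + (l.drop r).countP p := List.countP_append ..
    _ = r := by
        have ht : (l.take r).countP p = (l.take r).length := by
          rw [List.countP_eq_length]
          intro a ha
          obtain ⟨i, hi, rfl⟩ := List.mem_iff_getElem.mp ha
          rw [List.getElem_take]
          exact h1 i (by simp at hi; omega)
        have hd : (l.drop r).countP p = 0 := by
          rw [List.countP_eq_zero]
          intro a ha
          obtain ⟨i, hi, rfl⟩ := List.mem_iff_getElem.mp ha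
          have hlen : i < l.length - r := by simpa using hi
          rw [List.getElem_drop]
          simp [h2 (r + i) (by omega) (by omega)]
        rw [ht, hd, List.length_take]
        omega

-- binary search returns the count of elements < x on a non-decreasing list
lemma pvBisectGo_spec (srt : List Int) (x : Int) (hs : srt.Pairwise (· ≤ ·)) :
    ∀ (lo hi : Nat) (hlh : lo ≤ hi) (hhl : hi ≤ srt.length),
    (∀ i (h : i < lo), srt[i]'(by omega) < x) →
    (∀ i (h : i < srt.length), hi ≤ i → ¬ srt[i] < x) →
    pvBisectGo srt x lo hi = srt.countP (fun y => decide (y < x)) := by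
  have hmono : ∀ (i j : Nat) (hi : i < srt.length) (hj : j < srt.length), i ≤ j → srt[i] ≤ srt[j] := by
    intro i j hi hj hij
    rcases Nat.lt_or_ge i j with h | h
    · exact List.pairwise_iff_getElem.mp hs i j hi hj h
    · have : i = j := by omega
      subst this; exact le_refl _
  suffices H : ∀ (n lo hi : Nat) (hn : hi - lo ≤ n) (hlh : lo ≤ hi) (hhl : hi ≤ srt.length),
      (∀ i (h : i < lo), srt[i]'(by omega) < x) →
      (∀ i (h : i < srt.length), hi ≤ i → ¬ srt[i] < x) →
      pvBisectGo srt x lo hi = srt.countP (fun y => decide (y < x)) by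
    intro lo hi h1 h2 h3 h4
    exact H (hi - lo) lo hi le_rfl h1 h2 h3 h4
  intro n
  induction n with
  | zero =>
    intro lo hi hn hlh hhl hlow hhigh
    have heq : lo = hi := by omega
    rw [pvBisectGo, dif_neg (by omega)]
    refine (countP_cut srt _ lo (by omega) ?_ ?_).symm
    · intro i h; simpa using hlow i h
    · intro i h hge; simpa using hhigh i h (by omega)
  | succ n ih =>
    intro lo hi hn hlh hhl hlow hhigh
    rw [pvBisectGo]
    by_cases hlt : lo < hi
    · rw [dif_pos hlt]
      have hmid : (lo + hi) / 2 < srt.length := by omega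
      rw [List.getD_eq_getElem srt 0 hmid]
      by_cases hm : srt[(lo + hi) / 2] < x
      · rw [if_pos hm]
        refine ih ((lo + hi) / 2 + 1) hi (by omega) (by omega) hhl ?_ hhigh
        intro i h
        exact lt_of_le_of_lt (hmono i ((lo + hi) / 2) (by omega) hmid (by omega)) hm
      · rw [if_neg hm]
        refine ih lo ((lo + hi) / 2) (by omega) (by omega) (by omega) hlow ?_
        intro i h hge hcon
        exact hm (lt_of_le_of_lt (hmono ((lo + hi) / 2) i hmid h hge) hcon)
    · rw [dif_neg hlt]
      have heq : lo = hi := by omega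
      refine (countP_cut srt _ lo (by omega) ?_ ?_).symm
      · intro i h; simpa using hlow i h
      · intro i h hge; simpa using hhigh i h (by omega)

-- the shift computed by A's inner loop equals B's binary-search result
lemma shift_eq (rem : List Int) (index : Int) :
    rem.foldl (fun c ri => if ri < index then c + 1 else c) (0:Int)
      = ((pvBisectGo (PySem.List.sorted rem (fun x => x) false) index 0
            (PySem.List.sorted rem (fun x => x) false).length : Nat) : Int) := by
  have hA : rem.foldl (fun c ri => if ri < index then c + 1 else c) (0:Int)
      = (rem.countP (fun y => decide (y < index)) : Int) := by
    simpa using PySem.List.foldl_count_if (fun y => decide (y < index)) rem 0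
  have hs : (PySem.List.sorted rem (fun x => x) false).Pairwise (· ≤ ·) :=
    PySem.List.sorted_pairwise rem (fun x => x)
  have hB := pvBisectGo_spec (PySem.List.sorted rem (fun x => x) false) index hs
      0 (PySem.List.sorted rem (fun x => x) false).length (by omega) le_rfl
      (by intro i h; omega) (by intro i h hge; omega)
  rw [hA, hB, (PySem.List.sorted_perm rem (fun x => x) false).countP_eq]

-- ===== VERDICT (by name: the statement is the Claim_ definition above) =====
theorem adjust_indices_spec : Claim_equal_adjust_indices := by
  intro sub rem _hdom
  unfold Spec_adjust_indices adjust_indices adjust_indices_alt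
  refine PySem.List.foldl_congr_mem sub _ _ [] ?_
  intro acc x _hx
  by_cases hm : x ∈ rem
  · simp [hm]
  · simp [hm, shift_eq rem x]
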